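-- pv_equiv track=rewrite | github.com/sjktje/sjkabc | sjkabc/sjkabc.py | strip_triplets
-- ===== SOURCE A (Python) =====
-- def strip_triplets(abc):
--     """
--     Remove duplets, triplets, quadruplets, etc from string.
--
--     Please note that this simply removes the (n and leaves the following
--     notes.
--
--     Example::
--
--         >>> from sjkabc import strip_triplets
--         >>> stripped = strip_triplets('AB(3cBA Bcde|fd(3ddd (4efed (4BdBF')
--         >>> stripped
--         'ABcBA Bcde|fdddd efed BdBF'
--
--     :param str abc: abc to filter
--     :returns: abc without triplets
--     :rtype: str
--
--     """
--
--     ret = []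
--     abc_len = len(abc)
--     i = 0
--
--     while i < abc_len:
--         if abc[i] == '(' and abc_len > i+1 and abc[i+1].isdigit():
--             i += 2
--         else:
--             ret.append(abc[i])
--             i += 1
--
--     return ''.join(ret)
-- ===== SOURCE B (Python) =====
-- def strip_triplets(abc):
--     out = []
--     pending = False          # a '(' has been seen but not yet decided
--     for c in abc:
--         if pending:
--             if c.isdigit():
--                 pending = False          # drop the '(' and the digit
--             elif c == '(':
--                 out.append('(')          # emit the previous '(', stay pending
--             else:
--                 out.append('(')
--                 out.append(c)
--                 pending = False
--         elif c == '(':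
--             pending = True
--         else:
--             out.append(c)
--     if pending:
--         out.append('(')
--     return ''.join(out)
-- ===== Notes on version B (the rewrite author's own statement) =====
-- stated objective: alternative
-- what changed: Replaced the index-based while-loop with two-character lookahead by a single direct for-loop over the characters carrying a boolean state that remembers an undecided opening paren, deciding it when the next character arrives and flushing it after the loop.
import Mathlib
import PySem

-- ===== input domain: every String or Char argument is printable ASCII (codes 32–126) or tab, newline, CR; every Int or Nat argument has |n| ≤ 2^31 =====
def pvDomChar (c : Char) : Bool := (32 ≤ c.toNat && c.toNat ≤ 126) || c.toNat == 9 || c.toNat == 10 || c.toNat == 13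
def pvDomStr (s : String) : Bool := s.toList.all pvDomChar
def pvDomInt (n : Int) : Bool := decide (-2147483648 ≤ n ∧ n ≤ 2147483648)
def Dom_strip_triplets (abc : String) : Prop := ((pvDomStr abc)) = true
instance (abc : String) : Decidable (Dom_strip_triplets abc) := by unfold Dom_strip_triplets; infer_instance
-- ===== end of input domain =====

-- B replaces A's indexed lookahead loop by a one-pass state machine over the characters (alternative decomposition, same cost).

-- ===== PORT A =====
-- while i < abc_len: if abc[i]=='(' and abc_len > i+1 and abc[i+1].isdigit(): i+=2 else: ret.append(abc[i]); i+=1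
def stripLoopA (cs : List Char) (n i : Nat) (ret : List Char) : List Char :=
  if _h : i < n then
    match PySem.List.pyGet? cs (i : Int) with
    | none => ret      -- unreachable: the loop guard keeps i in range when n = cs.length
    | some c =>
      if c = '(' ∧ n > i + 1 ∧ ((PySem.List.pyGet? cs ((i : Int) + 1)).elim false PySem.Chars.isdigit) then
        stripLoopA cs n (i + 2) ret
      else
        stripLoopA cs n (i + 1) (ret ++ [c])
  else ret
termination_by n - i

def strip_triplets (abc : String) : String :=
  String.ofList (stripLoopA abc.toList abc.toList.length 0 [])

-- ===== PORT B =====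
def stripStepB (st : List Char × Bool) (c : Char) : List Char × Bool :=
  if st.2 then
    if PySem.Chars.isdigit c then (st.1, false)
    else if c = '(' then (st.1 ++ ['('], true)
    else (st.1 ++ ['(', c], false)
  else if c = '(' then (st.1, true)
  else (st.1 ++ [c], false)

def strip_triplets_alt (abc : String) : String :=
  let r := abc.toList.foldl stripStepB ([], false)
  String.ofList (if r.2 then r.1 ++ ['('] else r.1)

-- ===== PRECONDITION & SPEC =====
def Spec_strip_triplets (abc : String) (out : String) : Prop := out = strip_triplets_alt abc
instance (abc : String) (out : String) : Decidable (Spec_strip_triplets abc out) := by unfold Spec_strip_triplets; infer_instance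

-- ===== CLAIM (what is proved, stated in full; the proofs are below) =====
def Claim_equal_strip_triplets : Prop := ∀ (abc : String), Dom_strip_triplets abc → Spec_strip_triplets abc (strip_triplets abc)

-- ===== LEMMAS AND PROOFS =====

-- reference recursion: what both loops compute, structurally on the char list
def stripRec : List Char → List Char
  | [] => []
  | [c] => [c]
  | c :: d :: rest =>
    if c = '(' ∧ PySem.Chars.isdigit d then stripRec rest
    else c :: stripRec (d :: rest)

def finishB (r : List Char × Bool) : List Char := if r.2 then r.1 ++ ['('] else r.1

lemma foldlB_eq_stripRec (cs : List Char) : ∀ (acc : List Char) (p : Bool),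
    finishB (cs.foldl stripStepB (acc, p)) =
      acc ++ stripRec (if p then '(' :: cs else cs) := by
  induction cs with
  | nil =>
    intro acc p
    cases p <;> simp [finishB, stripRec]
  | cons c cs ih =>
    intro acc p
    cases p with
    | false =>
      by_cases hc : c = '('
      · simp [List.foldl_cons, stripStepB, hc, ih]
      · simp [List.foldl_cons, stripStepB, hc, ih]
        cases cs with
        | nil => simp [stripRec]
        | cons d rest => simp [stripRec, hc]
    | true =>
      by_cases hd : PySem.Chars.isdigit c = true
      · simp [List.foldl_cons, stripStepB, hd, ih, stripRec]
      · by_cases hc : c = '('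
        · subst hc
          simp [List.foldl_cons, stripStepB, hd, ih, stripRec]
        · simp [List.foldl_cons, stripStepB, hd, hc, ih]
          cases cs with
          | nil => simp [stripRec, hd]
          | cons d rest => simp [stripRec, hd, hc]

lemma pyGet1 (cs : List Char) (i : Nat) (h : i + 1 < cs.length) :
    PySem.List.pyGet? cs ((i : Int) + 1) = some cs[i+1] := by
  simp only [PySem.List.pyGet?, PySem.List.pyIdx?]
  have h0 : ((i : Int) + 1).toNat = i + 1 := by omega
  rw [if_pos (by omega : (0:Int) ≤ (i : Int) + 1), if_pos (by omega : ((i : Int) + 1) < (cs.length : Int)), h0]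
  simp [h]

lemma stripLoopA_eq_stripRec (cs : List Char) : ∀ (i : Nat) (ret : List Char),
    stripLoopA cs cs.length i ret = ret ++ stripRec (cs.drop i) := by
  have H : ∀ (k i : Nat), cs.length - i ≤ k → ∀ (ret : List Char),
      stripLoopA cs cs.length i ret = ret ++ stripRec (cs.drop i) := by
    intro k
    induction k with
    | zero =>
      intro i hk ret
      have hge : cs.length ≤ i := by omega
      rw [stripLoopA]
      simp [Nat.not_lt.mpr hge, List.drop_eq_nil_of_le hge, stripRec]
    | succ k ih =>
      intro i hk ret
      by_cases hi : i < cs.length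
      · have hget : PySem.List.pyGet? cs (i : Int) = some cs[i] := by
          simp [hi]
        rw [stripLoopA]
        rw [dif_pos hi, hget]
        change (if cs[i] = '(' ∧ cs.length > i + 1 ∧
            ((PySem.List.pyGet? cs ((i : Int) + 1)).elim false PySem.Chars.isdigit) then
            stripLoopA cs cs.length (i + 2) ret
          else stripLoopA cs cs.length (i + 1) (ret ++ [cs[i]])) = ret ++ stripRec (cs.drop i)
        have hdrop : cs.drop i = cs[i] :: cs.drop (i + 1) :=
          List.drop_eq_getElem_cons hi
        by_cases hcond : cs[i] = '(' ∧ cs.length > i + 1 ∧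
            ((PySem.List.pyGet? cs ((i : Int) + 1)).elim false PySem.Chars.isdigit)
        · -- skip the pair
          obtain ⟨hpar, hlt, hdig⟩ := hcond
          rw [if_pos ⟨hpar, hlt, hdig⟩, ih (i + 2) (by omega) ret]
          have hdrop1 : cs.drop (i + 1) = cs[i+1] :: cs.drop (i + 2) :=
            List.drop_eq_getElem_cons hlt
          rw [hdrop, hdrop1, stripRec]
          rw [pyGet1 cs i hlt] at hdig
          simp only [Option.elim] at hdig
          rw [if_pos ⟨hpar, hdig⟩]
        · -- emit one character
          rw [if_neg hcond, ih (i + 1) (by omega) (ret ++ [cs[i]])]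
          rw [hdrop]
          by_cases hlt : cs.length > i + 1
          · have hdrop1 : cs.drop (i + 1) = cs[i+1] :: cs.drop (i + 2) :=
              List.drop_eq_getElem_cons hlt
            rw [hdrop1, stripRec]
            have hno : ¬ (cs[i] = '(' ∧ PySem.Chars.isdigit cs[i+1] = true) := by
              intro hx
              exact hcond ⟨hx.1, hlt, by rw [pyGet1 cs i hlt]; simpa using hx.2⟩
            rw [if_neg hno, ← hdrop1]
            simp
          · have hnil : cs.drop (i + 1) = [] :=
              List.drop_eq_nil_of_le (by omega)
            rw [hnil, stripRec]
            simp [stripRec]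
      · rw [stripLoopA]
        rw [dif_neg hi]
        rw [List.drop_eq_nil_of_le (Nat.le_of_not_lt hi)]
        simp [stripRec]
  intro i ret
  exact H (cs.length - i) i (le_refl _) ret

-- ===== VERDICT (by name: the statement is the Claim_ definition above) =====
theorem strip_triplets_spec : Claim_equal_strip_triplets := by
  intro abc _
  unfold Spec_strip_triplets strip_triplets strip_triplets_alt
  rw [stripLoopA_eq_stripRec abc.toList 0 []]
  have := foldlB_eq_stripRec abc.toList [] false
  simp only [if_neg (by simp : ¬ (false = true))] at this
  simp [finishB] at this ⊢
  rw [this]
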